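-- pv_equiv track=rewrite | github.com/Mohammedfaiz-27/factit_project | backend/app/services/perplexity_service.py | _format_x_evidence
-- ===== SOURCE A (Python) =====
-- def _format_x_evidence(x_evidence: list) -> str:
--     """
--     Format X posts as an evidence section for the research prompt.
--
--     Posts are grouped by author category (Tamil news, National news, Public).
--     """
--     if not x_evidence:
--         return ""
--
--     tamil_posts = [p for p in x_evidence if p.get("author_category") == "tamil_news"]
--     national_posts = [p for p in x_evidence if p.get("author_category") == "national_news"]
--     common_posts = [p for p in x_evidence if p.get("author_category") == "common_people"]
--
--     lines = [
--         "===============================================================================",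
--         "X (SOCIAL MEDIA) EVIDENCE — Posts found discussing this claim:",
--         "===============================================================================",
--     ]
--
--     if tamil_posts:
--         lines.append("[TAMIL NEWS CHANNELS]")
--         for p in tamil_posts:
--             text = p.get("text", "").replace("\n", " ")[:140]
--             lines.append(f"- @{p.get('author_handle', '?')} ({p.get('date', '?')}): \"{text}\"")
--         lines.append("")
--
--     if national_posts:
--         lines.append("[NATIONAL NEWS CHANNELS]")
--         for p in national_posts:
--             text = p.get("text", "").replace("\n", " ")[:140]
--             lines.append(f"- @{p.get('author_handle', '?')} ({p.get('date', '?')}): \"{text}\"")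
--         lines.append("")
--
--     if common_posts:
--         lines.append("[PUBLIC POSTS]")
--         for p in common_posts:
--             text = p.get("text", "").replace("\n", " ")[:140]
--             lines.append(f"- @{p.get('author_handle', '?')} ({p.get('date', '?')}): \"{text}\"")
--         lines.append("")
--
--     lines.append("Use these X posts as LEADS for your research. Verify the claims made in these posts")
--     lines.append("using credible sources. Posts from news channels are more reliable than common users.")
--     lines.append("If news channel posts report specific facts, try to find the original articles or sources.")
--
--     return "\n".join(lines)
-- ===== SOURCE B (Python) =====
-- _RANK = {"tamil_news": 0, "national_news": 1, "common_people": 2}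
-- _LABELS = ["[TAMIL NEWS CHANNELS]", "[NATIONAL NEWS CHANNELS]", "[PUBLIC POSTS]"]
--
--
-- def _rank(p):
--     return _RANK.get(p.get("author_category"), 3)
--
--
-- def _format_x_evidence(x_evidence: list) -> str:
--     if not x_evidence:
--         return ""
--
--     # Stable sort by category rank, then a single run-detecting scan:
--     # a header is emitted whenever the rank changes, a blank line closes each run.
--     ranked = sorted([p for p in x_evidence if _rank(p) < 3], key=_rank)
--
--     lines = [
--         "===============================================================================",
--         "X (SOCIAL MEDIA) EVIDENCE — Posts found discussing this claim:",
--         "===============================================================================",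
--     ]
--     prev = None
--     for p in ranked:
--         r = _rank(p)
--         if prev != r:
--             if prev is not None:
--                 lines.append("")
--             lines.append(_LABELS[r])
--             prev = r
--         text = p.get("text", "").replace("\n", " ")[:140]
--         lines.append(f"- @{p.get('author_handle', '?')} ({p.get('date', '?')}): \"{text}\"")
--     if prev is not None:
--         lines.append("")
--
--     lines.append("Use these X posts as LEADS for your research. Verify the claims made in these posts")
--     lines.append("using credible sources. Posts from news channels are more reliable than common users.")
--     lines.append("If news channel posts report specific facts, try to find the original articles or sources.")
--     return "\n".join(lines)
-- ===== Notes on version B (the rewrite author's own statement) =====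
-- stated objective: alternative
-- what changed: Instead of three category-filter passes and three copy-pasted if-blocks, B stably sorts the relevant posts once by a numeric category rank and emits the whole body in a single run-detecting scan that writes a header whenever the rank changes and a blank line at each run end.
import Mathlib
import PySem

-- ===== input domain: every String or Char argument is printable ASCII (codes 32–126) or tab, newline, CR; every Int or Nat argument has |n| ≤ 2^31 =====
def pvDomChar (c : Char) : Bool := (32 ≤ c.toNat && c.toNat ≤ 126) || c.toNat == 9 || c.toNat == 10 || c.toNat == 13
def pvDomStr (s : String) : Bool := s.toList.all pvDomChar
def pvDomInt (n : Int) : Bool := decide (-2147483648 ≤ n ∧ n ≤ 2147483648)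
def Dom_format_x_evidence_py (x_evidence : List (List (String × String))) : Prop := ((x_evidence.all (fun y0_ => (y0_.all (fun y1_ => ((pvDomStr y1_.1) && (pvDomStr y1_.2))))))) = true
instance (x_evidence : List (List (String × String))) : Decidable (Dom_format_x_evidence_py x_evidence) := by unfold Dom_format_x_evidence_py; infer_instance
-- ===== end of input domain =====

-- B replaces A's three filter passes + three copy-pasted if-blocks by a stable sort on a
-- category rank followed by ONE run-detecting scan that emits a header at each rank change.

-- ===== PORT A =====
-- shared string constants (verbatim literals from the Python)
def pvHeader : List String :=
  ["===============================================================================",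
   "X (SOCIAL MEDIA) EVIDENCE — Posts found discussing this claim:",
   "==============================================================================="]

def pvTrailer : List String :=
  ["Use these X posts as LEADS for your research. Verify the claims made in these posts",
   "using credible sources. Posts from news channels are more reliable than common users.",
   "If news channel posts report specific facts, try to find the original articles or sources."]

def format_x_evidence_py (x_evidence : List (List (String × String))) : String :=
  if x_evidence = [] then "" else
  let tamil_posts := x_evidence.filter (fun p => (PySem.Dict.mk p).get? "author_category" == some "tamil_news")
  let national_posts := x_evidence.filter (fun p => (PySem.Dict.mk p).get? "author_category" == some "national_news")
  let common_posts := x_evidence.filter (fun p => (PySem.Dict.mk p).get? "author_category" == some "common_people")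
  let lines := pvHeader
  let lines := if tamil_posts ≠ [] then
      (tamil_posts.foldl (fun ls p =>
        let text := PySem.Str.slice (PySem.Str.replace ((PySem.Dict.mk p).getD "text" "") "\n" " ") none (some 140)
        ls ++ ["- @" ++ (PySem.Dict.mk p).getD "author_handle" "?" ++ " (" ++ (PySem.Dict.mk p).getD "date" "?" ++ "): \"" ++ text ++ "\""])
        (lines ++ ["[TAMIL NEWS CHANNELS]"])) ++ [""]
    else lines
  let lines := if national_posts ≠ [] then
      (national_posts.foldl (fun ls p =>
        let text := PySem.Str.slice (PySem.Str.replace ((PySem.Dict.mk p).getD "text" "") "\n" " ") none (some 140)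
        ls ++ ["- @" ++ (PySem.Dict.mk p).getD "author_handle" "?" ++ " (" ++ (PySem.Dict.mk p).getD "date" "?" ++ "): \"" ++ text ++ "\""])
        (lines ++ ["[NATIONAL NEWS CHANNELS]"])) ++ [""]
    else lines
  let lines := if common_posts ≠ [] then
      (common_posts.foldl (fun ls p =>
        let text := PySem.Str.slice (PySem.Str.replace ((PySem.Dict.mk p).getD "text" "") "\n" " ") none (some 140)
        ls ++ ["- @" ++ (PySem.Dict.mk p).getD "author_handle" "?" ++ " (" ++ (PySem.Dict.mk p).getD "date" "?" ++ "): \"" ++ text ++ "\""])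
        (lines ++ ["[PUBLIC POSTS]"])) ++ [""]
    else lines
  let lines := lines ++ pvTrailer
  PySem.Str.join "\n" lines

-- ===== PORT B =====
def pvRankDict : PySem.Dict String Int :=
  PySem.Dict.mk [("tamil_news", 0), ("national_news", 1), ("common_people", 2)]

def pvLabels : List String :=
  ["[TAMIL NEWS CHANNELS]", "[NATIONAL NEWS CHANNELS]", "[PUBLIC POSTS]"]

-- _rank(p) = _RANK.get(p.get("author_category"), 3)
def pvRank (p : List (String × String)) : Int :=
  match (PySem.Dict.mk p).get? "author_category" with
  | some c => pvRankDict.getD c 3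
  | none => 3

def pvFmtPost (p : List (String × String)) : String :=
  let text := PySem.Str.slice (PySem.Str.replace ((PySem.Dict.mk p).getD "text" "") "\n" " ") none (some 140)
  "- @" ++ (PySem.Dict.mk p).getD "author_handle" "?" ++ " (" ++ (PySem.Dict.mk p).getD "date" "?" ++ "): \"" ++ text ++ "\""

-- one iteration of B's scan loop; state = (lines, prev)
-- (_LABELS[r] is ported with pyGetD: r ∈ {0,1,2} here, so the index is always in range)
def pvStep (st : List String × Option Int) (p : List (String × String)) : List String × Option Int :=
  let r := pvRank p
  if st.2 ≠ some r then
    ((st.1 ++ (if st.2 = none then [] else [""])) ++ [PySem.List.pyGetD pvLabels r "", pvFmtPost p], some r)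
  else (st.1 ++ [pvFmtPost p], some r)

def format_x_evidence_py_alt (x_evidence : List (List (String × String))) : String :=
  if x_evidence = [] then "" else
  let ranked := PySem.List.sorted (x_evidence.filter (fun p => pvRank p < 3)) pvRank
  let st := ranked.foldl pvStep (pvHeader, none)
  let lines := st.1 ++ (if st.2 = none then [] else [""])
  PySem.Str.join "\n" (lines ++ pvTrailer)

-- ===== PRECONDITION & SPEC =====
def Spec_format_x_evidence_py (x_evidence : List (List (String × String))) (out : String) : Prop := out = format_x_evidence_py_alt x_evidence
instance (x_evidence : List (List (String × String))) (out : String) : Decidable (Spec_format_x_evidence_py x_evidence out) := by unfold Spec_format_x_evidence_py; infer_instance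

-- ===== CLAIM (what is proved, stated in full; the proofs are below) =====
def Claim_equal_format_x_evidence_py : Prop := ∀ (x_evidence : List (List (String × String))), Dom_format_x_evidence_py x_evidence → Spec_format_x_evidence_py x_evidence (format_x_evidence_py x_evidence)


-- ===== LEMMAS AND PROOFS =====

-- characterisation of pvRank: which category gives which rank, and the possible values
theorem pvRank_spec (p : List (String × String)) :
    (pvRank p = 0 ↔ (PySem.Dict.mk p).get? "author_category" = some "tamil_news") ∧
    (pvRank p = 1 ↔ (PySem.Dict.mk p).get? "author_category" = some "national_news") ∧
    (pvRank p = 2 ↔ (PySem.Dict.mk p).get? "author_category" = some "common_people") ∧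
    (pvRank p = 0 ∨ pvRank p = 1 ∨ pvRank p = 2 ∨ pvRank p = 3) := by
  unfold pvRank
  cases h : (PySem.Dict.mk p).get? "author_category" with
  | none => simp
  | some c =>
    simp only [Option.some.injEq]
    by_cases h1 : c = "tamil_news"
    · simp [h1, pvRankDict, PySem.Dict.getD, PySem.Dict.get?]
    · have e1 : ("tamil_news" == c) = false := by simp [Ne.symm h1]
      by_cases h2 : c = "national_news"
      · simp [h2, pvRankDict, PySem.Dict.getD, PySem.Dict.get?]
      · have e2 : ("national_news" == c) = false := by simp [Ne.symm h2]
        by_cases h3 : c = "common_people"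
        · simp [h3, pvRankDict, PySem.Dict.getD, PySem.Dict.get?]
        · have e3 : ("common_people" == c) = false := by simp [Ne.symm h3]
          simp [pvRankDict, PySem.Dict.getD, PySem.Dict.get?, e1, e2, e3, h1, h2, h3]

-- insertBy skips a prefix it does not go before
theorem pvInsertBy_prefix {α : Type} (before : α → α → Bool) (x : α) (l m : List α)
    (h : ∀ y ∈ l, before x y = false) :
    PySem.List.insertBy before x (l ++ m) = l ++ PySem.List.insertBy before x m := by
  induction l with
  | nil => simp
  | cons y ys ih =>
    simp [PySem.List.insertBy, h y (by simp), ih (fun z hz => h z (by simp [hz]))]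

-- insertBy goes to the front of a list it goes before everywhere
theorem pvInsertBy_front {α : Type} (before : α → α → Bool) (x : α) (m : List α)
    (h : ∀ y ∈ m, before x y = true) :
    PySem.List.insertBy before x m = x :: m := by
  cases m with
  | nil => simp [PySem.List.insertBy]
  | cons y ys => simp [PySem.List.insertBy, h y (by simp)]

-- B's stable insertion sort on ranks, seen as three accumulating buckets
theorem pvFoldlIns (xs a0 a1 a2 : List (List (String × String)))
    (ha0 : ∀ q ∈ a0, pvRank q = 0) (ha1 : ∀ q ∈ a1, pvRank q = 1) (ha2 : ∀ q ∈ a2, pvRank q = 2)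
    (hxs : ∀ q ∈ xs, pvRank q < 3) :
    xs.foldl (fun acc x => PySem.List.insertBy (fun a b => decide (pvRank a < pvRank b)) x acc)
        (a0 ++ a1 ++ a2) =
      (a0 ++ xs.filter (fun q => decide (pvRank q = 0))) ++
        (a1 ++ xs.filter (fun q => decide (pvRank q = 1))) ++
        (a2 ++ xs.filter (fun q => decide (pvRank q = 2))) := by
  induction xs generalizing a0 a1 a2 with
  | nil => simp
  | cons x xs ih =>
    have hx3 := hxs x (by simp)
    have hxs' : ∀ q ∈ xs, pvRank q < 3 := fun q hq => hxs q (by simp [hq])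
    simp only [List.foldl_cons, List.filter_cons]
    rcases (pvRank_spec x).2.2.2 with hr | hr | hr | hr
    · have hstep : PySem.List.insertBy (fun a b => decide (pvRank a < pvRank b)) x (a0 ++ a1 ++ a2)
          = (a0 ++ [x]) ++ a1 ++ a2 := by
        rw [List.append_assoc,
            pvInsertBy_prefix _ _ _ _ (fun y hy => by simp [hr, ha0 y hy]),
            pvInsertBy_front _ _ _ (fun y hy => by
              rcases List.mem_append.mp hy with hy | hy
              · simp [hr, ha1 y hy]
              · simp [hr, ha2 y hy])]
        simp
      rw [hstep, ih (a0 ++ [x]) a1 a2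
            (fun q hq => by rcases List.mem_append.mp hq with hq | hq
                            · exact ha0 q hq
                            · simp at hq; simpa [hq] using hr) ha1 ha2 hxs']
      simp [hr]
    · have hstep : PySem.List.insertBy (fun a b => decide (pvRank a < pvRank b)) x (a0 ++ a1 ++ a2)
          = a0 ++ (a1 ++ [x]) ++ a2 := by
        rw [List.append_assoc,
            pvInsertBy_prefix _ _ _ _ (fun y hy => by simp [hr, ha0 y hy]),
            pvInsertBy_prefix _ _ _ _ (fun y hy => by simp [hr, ha1 y hy]),
            pvInsertBy_front _ _ _ (fun y hy => by simp [hr, ha2 y hy])]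
        simp
      rw [hstep, ih a0 (a1 ++ [x]) a2 ha0
            (fun q hq => by rcases List.mem_append.mp hq with hq | hq
                            · exact ha1 q hq
                            · simp at hq; simpa [hq] using hr) ha2 hxs']
      simp [hr]
    · have hstep : PySem.List.insertBy (fun a b => decide (pvRank a < pvRank b)) x (a0 ++ a1 ++ a2)
          = a0 ++ a1 ++ (a2 ++ [x]) := by
        rw [PySem.List.insertBy_of_forall_not_before _ _ _ (fun y hy => by
              rcases List.mem_append.mp hy with hy | hy
              · rcases List.mem_append.mp hy with hy | hy
                · simp [hr, ha0 y hy]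
                · simp [hr, ha1 y hy]
              · simp [hr, ha2 y hy])]
        simp
      rw [hstep, ih a0 a1 (a2 ++ [x]) ha0 ha1
            (fun q hq => by rcases List.mem_append.mp hq with hq | hq
                            · exact ha2 q hq
                            · simp at hq; simpa [hq] using hr) hxs']
      simp [hr]
    · omega

-- B's scan over a run whose rank equals the running one: only post lines are appended
theorem pvScanSame (bs : List (List (String × String))) (lines : List String) (r : Int)
    (h : ∀ q ∈ bs, pvRank q = r) :
    bs.foldl pvStep (lines, some r) = (lines ++ bs.map pvFmtPost, some r) := by
  induction bs generalizing lines with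
  | nil => simp
  | cons b bs ih =>
    have hb := h b (by simp)
    simp only [List.foldl_cons, List.map_cons]
    rw [show pvStep (lines, some r) b = (lines ++ [pvFmtPost b], some r) from by
          simp [pvStep, hb]]
    rw [ih _ (fun q hq => h q (by simp [hq]))]
    simp

-- B's scan over a whole non-empty run of rank r, entered with a different running rank
theorem pvScanBlock (bs : List (List (String × String))) (lines : List String)
    (prev : Option Int) (r : Int) (hne : bs ≠ []) (h : ∀ q ∈ bs, pvRank q = r)
    (hprev : prev ≠ some r) :
    bs.foldl pvStep (lines, prev) =
      ((lines ++ (if prev = none then [] else [""])) ++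
        (PySem.List.pyGetD pvLabels r "" :: bs.map pvFmtPost), some r) := by
  cases bs with
  | nil => exact absurd rfl hne
  | cons b bs =>
    have hb := h b (by simp)
    simp only [List.foldl_cons, List.map_cons]
    rw [show pvStep (lines, prev) b =
          ((lines ++ (if prev = none then [] else [""])) ++
            [PySem.List.pyGetD pvLabels r "", pvFmtPost b], some r) from by
          simp [pvStep, hb, hprev]]
    rw [pvScanSame _ _ _ (fun q hq => h q (by simp [hq]))]
    simp

-- A's per-post formatting lambda is pvFmtPost
theorem pvFmtA_eq :
    (fun (ls : List String) (p : List (String × String)) =>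
      let text := PySem.Str.slice (PySem.Str.replace ((PySem.Dict.mk p).getD "text" "") "\n" " ") none (some 140)
      ls ++ ["- @" ++ (PySem.Dict.mk p).getD "author_handle" "?" ++ " (" ++ (PySem.Dict.mk p).getD "date" "?" ++ "): \"" ++ text ++ "\""])
    = (fun ls p => ls ++ [pvFmtPost p]) := rfl

-- ===== VERDICT (by name: the statement is the Claim_ definition above) =====
theorem format_x_evidence_py_spec : Claim_equal_format_x_evidence_py := by
  intro xs _
  unfold Spec_format_x_evidence_py format_x_evidence_py format_x_evidence_py_alt
  by_cases hnil : xs = []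
  · simp [hnil]
  · simp only [hnil, ite_false]
    -- name the three rank buckets
    have efT : xs.filter (fun p => (PySem.Dict.mk p).get? "author_category" == some "tamil_news")
        = xs.filter (fun q => decide (pvRank q = 0)) :=
      List.filter_congr (fun p _ => by
        by_cases hc : (PySem.Dict.mk p).get? "author_category" = some "tamil_news"
        · simp [hc, (pvRank_spec p).1.mpr hc]
        · have hr : pvRank p ≠ 0 := fun e => hc ((pvRank_spec p).1.mp e)
          simp [hc, hr])
    have efN : xs.filter (fun p => (PySem.Dict.mk p).get? "author_category" == some "national_news")
        = xs.filter (fun q => decide (pvRank q = 1)) :=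
      List.filter_congr (fun p _ => by
        by_cases hc : (PySem.Dict.mk p).get? "author_category" = some "national_news"
        · simp [hc, (pvRank_spec p).2.1.mpr hc]
        · have hr : pvRank p ≠ 1 := fun e => hc ((pvRank_spec p).2.1.mp e)
          simp [hc, hr])
    have efC : xs.filter (fun p => (PySem.Dict.mk p).get? "author_category" == some "common_people")
        = xs.filter (fun q => decide (pvRank q = 2)) :=
      List.filter_congr (fun p _ => by
        by_cases hc : (PySem.Dict.mk p).get? "author_category" = some "common_people"
        · simp [hc, (pvRank_spec p).2.2.1.mpr hc]
        · have hr : pvRank p ≠ 2 := fun e => hc ((pvRank_spec p).2.2.1.mp e)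
          simp [hc, hr])
    have hsort : PySem.List.sorted (xs.filter (fun p => decide (pvRank p < 3))) pvRank
        = xs.filter (fun q => decide (pvRank q = 0)) ++ xs.filter (fun q => decide (pvRank q = 1))
            ++ xs.filter (fun q => decide (pvRank q = 2)) := by
      rw [PySem.List.sorted_eq_foldl_insertBy]
      have h := pvFoldlIns (xs.filter (fun p => decide (pvRank p < 3))) [] [] []
        (by simp) (by simp) (by simp)
        (fun q hq => by simpa using (List.mem_filter.mp hq).2)
      simp only [List.nil_append] at h
      rw [h, List.filter_filter, List.filter_filter, List.filter_filter]
      congr 1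
      · congr 1
        · exact List.filter_congr (fun q _ => by by_cases hq : pvRank q = 0 <;> simp [hq])
        · exact List.filter_congr (fun q _ => by by_cases hq : pvRank q = 1 <;> simp [hq])
      · exact List.filter_congr (fun q _ => by by_cases hq : pvRank q = 2 <;> simp [hq])
    have hm0 : ∀ q ∈ xs.filter (fun q => decide (pvRank q = 0)), pvRank q = 0 :=
      fun q hq => by simpa using (List.mem_filter.mp hq).2
    have hm1 : ∀ q ∈ xs.filter (fun q => decide (pvRank q = 1)), pvRank q = 1 :=
      fun q hq => by simpa using (List.mem_filter.mp hq).2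
    have hm2 : ∀ q ∈ xs.filter (fun q => decide (pvRank q = 2)), pvRank q = 2 :=
      fun q hq => by simpa using (List.mem_filter.mp hq).2
    simp only [efT, efN, efC, hsort, pvFmtA_eq, List.foldl_append]
    have lab0 : PySem.List.pyGetD pvLabels 0 "" = "[TAMIL NEWS CHANNELS]" := rfl
    have lab1 : PySem.List.pyGetD pvLabels 1 "" = "[NATIONAL NEWS CHANNELS]" := rfl
    have lab2 : PySem.List.pyGetD pvLabels 2 "" = "[PUBLIC POSTS]" := rfl
    by_cases h0 : xs.filter (fun q => decide (pvRank q = 0)) = [] <;>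
      by_cases h1 : xs.filter (fun q => decide (pvRank q = 1)) = [] <;>
        by_cases h2 : xs.filter (fun q => decide (pvRank q = 2)) = [] <;>
      simp only [h0, h1, h2, List.foldl_nil, ne_eq,
        not_true_eq_false, not_false_eq_true, if_pos, if_neg,
        PySem.List.foldl_append_singleton_eq_map] <;>
      (try rw [pvScanBlock _ _ _ 0 h0 hm0 (by simp)]) <;>
      (try rw [pvScanBlock _ _ _ 1 h1 hm1 (by simp)]) <;>
      (try rw [pvScanBlock _ _ _ 2 h2 hm2 (by simp)]) <;>
      simp [lab0, lab1, lab2, List.append_assoc]
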